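-- pv_equiv track=rewrite | github.com/MrTypeError/DSA | Stack/Questions On Stacks/Remove_Duplicate_Letters.py | solve
-- ===== SOURCE A (Python) =====
-- def solve(s):
--     last={}
--     #map is ready
--     for i , el in enumerate(s):
--         last[el]=i
--     #stack is created
--     st=[]
--     #creating a set
--     peresent = set()
--
--     #for index, element in s
--     # This will traverse
--     for i,e in enumerate(s):
--         if e in peresent:
--             continue
--         #This will check the conditions and remove the elements from the map
--         while st and st[-1]>e and last[st[-1]]>i:
--             temp=st.pop()
--             peresent.remove(temp)
--         #append elements in the stack
--         st.append(e)
--         #add elements in the set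
--         peresent.add(e)
--
--     return "".join(st)
-- ===== SOURCE B (Python) =====
-- def solve(s):
--     # Recursive selection: the first output letter is the smallest character
--     # seen before some character's remaining supply runs out; recurse on the
--     # rest of the string with that letter removed.
--     if not s:
--         return ""
--     cnt = {}
--     for ch in s:
--         cnt[ch] = cnt.get(ch, 0) + 1
--     pos = 0
--     for i, ch in enumerate(s):
--         if ch < s[pos]:
--             pos = i
--         cnt[ch] -= 1
--         if cnt[ch] == 0:
--             break
--     c = s[pos]
--     return c + solve("".join(ch for ch in s[pos + 1:] if ch != c))
-- ===== Notes on version B (the rewrite author's own statement) =====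
-- stated objective: alternative
-- what changed: Replaces the single greedy stack-with-last-occurrence-map pass by a recursive selection: count remaining occurrences, scan to the first character whose supply runs out while tracking the smallest character seen, emit it and recurse on the remainder with that character removed.
import Mathlib
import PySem

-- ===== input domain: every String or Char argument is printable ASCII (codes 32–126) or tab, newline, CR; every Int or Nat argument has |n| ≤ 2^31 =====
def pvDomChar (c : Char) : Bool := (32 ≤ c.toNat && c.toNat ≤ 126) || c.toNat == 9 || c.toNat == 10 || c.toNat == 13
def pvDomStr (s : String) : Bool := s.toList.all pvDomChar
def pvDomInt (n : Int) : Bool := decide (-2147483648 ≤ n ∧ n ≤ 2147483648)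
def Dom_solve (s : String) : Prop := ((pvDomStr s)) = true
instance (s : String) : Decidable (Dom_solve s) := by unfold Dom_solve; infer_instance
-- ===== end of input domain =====

-- B replaces A's greedy stack pass by a recursive smallest-head selection; alternative decomposition, same results.

-- ===== PORT A =====
-- the `while st and st[-1]>e and last[st[-1]]>i` loop; `present.remove(temp)` is ported as
-- Set.discard (the KeyError of set.remove is unreachable: the popped element is in the set),
-- `last[st[-1]]` as getD (KeyError unreachable: every stacked character is a key of `last`)
def popLoop (last : PySem.Dict Char Int) (i : Int) (e : Char) (st : List Char)
    (present : PySem.Set Char) : List Char × PySem.Set Char :=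
  if h : st = [] then (st, present)
  else
    let t := st.getLast h
    if e < t ∧ i < last.getD t 0 then
      popLoop last i e st.dropLast (PySem.Set.discard present t)
    else (st, present)
termination_by st.length
decreasing_by
  have : st.length ≠ 0 := fun hl => h (List.eq_nil_of_length_eq_zero hl)
  simp [List.length_dropLast]; omega

-- the `for i,e in enumerate(s)` loop over the state (st, peresent)
def solveLoop (last : PySem.Dict Char Int) : List (Int × Char) → List Char → PySem.Set Char →
    List Char × PySem.Set Char
  | [], st, present => (st, present)
  | (i, e) :: rest, st, present =>
    if PySem.Set.contains present e then solveLoop last rest st present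
    else
      let p := popLoop last i e st present
      solveLoop last rest (p.1 ++ [e]) (PySem.Set.add p.2 e)

def solve (s : String) : String :=
  let cs := s.toList
  let last := (PySem.List.enumerate cs 0).foldl (fun d p => d.insert p.2 p.1) PySem.Dict.empty
  let res := solveLoop last (PySem.List.enumerate cs 0) [] PySem.Set.empty
  String.ofList res.1

-- ===== PORT B =====
-- the `for i, ch in enumerate(s)` loop with its break: returns the final `pos`;
-- `s[pos]` is ported as pyGetD (IndexError unreachable: pos is always an index of s)
def altLoop (cs : List Char) : List (Int × Char) → Int → PySem.Dict Char Int → Int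
  | [], pos, _ => pos
  | (i, ch) :: rest, pos, cnt =>
    let pos' := if ch < PySem.List.pyGetD cs pos ' ' then i else pos
    let cnt' := cnt.modify ch 0 (· - 1)
    if cnt'.getD ch 0 == 0 then pos' else altLoop cs rest pos' cnt'

theorem altLoop_nonneg (cs : List Char) (l : List (Int × Char)) (pos : Int)
    (cnt : PySem.Dict Char Int) (hl : ∀ p ∈ l, 0 ≤ p.1) (hp : 0 ≤ pos) :
    0 ≤ altLoop cs l pos cnt := by
  induction l generalizing pos cnt with
  | nil => exact hp
  | cons p rest ih =>
    obtain ⟨i, ch⟩ := p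
    simp only [altLoop]
    split
    · split <;> [exact hl (i, ch) (by simp); exact hp]
    · apply ih _ _ (fun q hq => hl q (by simp [hq]))
      split <;> [exact hl (i, ch) (by simp); exact hp]

theorem enumerate_fst_nonneg (cs : List Char) (p : Int × Char)
    (hp : p ∈ PySem.List.enumerate cs 0) : 0 ≤ p.1 := by
  rw [PySem.List.mem_enumerate_iff] at hp
  obtain ⟨k, hk, rfl⟩ := hp
  simp

-- recursive selection on the character list ("" ↦ [], c + solve(rest) ↦ c :: solveAltList rest)
def solveAltList (cs : List Char) : List Char :=
  if h : cs = [] then []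
  else
    let cnt := cs.foldl (fun d ch => d.modify ch 0 (· + 1)) PySem.Dict.empty
    let pos := altLoop cs (PySem.List.enumerate cs 0) 0 cnt
    let c := PySem.List.pyGetD cs pos ' '
    c :: solveAltList ((PySem.List.slice cs (some (pos + 1)) none).filter (fun ch => ch ≠ c))
termination_by cs.length
decreasing_by
  have hpos : 0 ≤ pos := altLoop_nonneg cs _ 0 cnt (enumerate_fst_nonneg cs) le_rfl
  have h1 : (0:Int) ≤ pos + 1 := by omega
  rw [PySem.List.slice_from _ h1]
  have h2 : 1 ≤ (pos + 1).toNat := by omega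
  have h3 : 0 < cs.length := List.length_pos_of_ne_nil h
  calc (((cs.drop (pos+1).toNat)).filter (fun ch => ch ≠ c)).length
      ≤ (cs.drop (pos+1).toNat).length := List.length_filter_le _ _
    _ < cs.length := by rw [List.length_drop]; omega

def solve_alt (s : String) : String := String.ofList (solveAltList s.toList)

-- ===== PRECONDITION & SPEC =====
def Spec_solve (s : String) (out : String) : Prop := out = solve_alt s
instance (s : String) (out : String) : Decidable (Spec_solve s out) := by unfold Spec_solve; infer_instance

-- ===== CLAIM (what is proved, stated in full; the proofs are below) =====
def Claim_equal_solve : Prop := ∀ (s : String), Dom_solve s → Spec_solve s (solve s)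

-- ===== LEMMAS AND PROOFS =====

-- The common abstract algorithm: a greedy stack (top at the head) whose pop test is
-- "top is larger than the incoming character and occurs again in the remaining suffix".
def popW (e : Char) (r : List Char) : List Char → List Char
  | [] => []
  | x :: st => if e < x ∧ x ∈ r then popW e r st else x :: st

def G : List Char → List Char → List Char
  | st, [] => st.reverse
  | st, e :: r => if e ∈ st then G st r else G (e :: popW e r st) r

-- ---- generic list index helpers ----

theorem mem_drop_of_getElem? {x : Char} (cs : List Char) (n j : Nat) (hnj : n ≤ j)
    (h : cs[j]? = some x) : x ∈ cs.drop n := by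
  rw [List.getElem?_eq_some_iff] at h
  obtain ⟨hj, hx⟩ := h
  have hlt : j - n < (cs.drop n).length := by simp [List.length_drop]; omega
  have heq : (cs.drop n)[j - n]'hlt = cs[j]'hj := by
    rw [List.getElem_drop]
    congr 1
    omega
  rw [← hx, ← heq]
  exact List.getElem_mem hlt

theorem exists_getElem?_of_mem_drop {x : Char} (cs : List Char) (n : Nat)
    (h : x ∈ cs.drop n) : ∃ j, n ≤ j ∧ cs[j]? = some x := by
  obtain ⟨m, hm, hx⟩ := List.getElem_of_mem h
  rw [List.getElem_drop] at hx
  have hlen : n + m < cs.length := by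
    have := hm
    simp [List.length_drop] at this
    omega
  exact ⟨n + m, by omega, by rw [List.getElem?_eq_some_iff]; exact ⟨hlen, hx⟩⟩

theorem drop_subset_drop {x : Char} (cs : List Char) (n m : Nat) (hnm : n ≤ m)
    (h : x ∈ cs.drop m) : x ∈ cs.drop n := by
  obtain ⟨j, hj, hx⟩ := exists_getElem?_of_mem_drop cs m h
  exact mem_drop_of_getElem? cs n j (by omega) hx

-- ---- the `last` dictionary built by A's first loop ----

theorem buildLast_not_mem (x : Char) : ∀ (cs : List Char) (k : Int) (d : PySem.Dict Char Int),
    x ∉ cs →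
    ((PySem.List.enumerate cs k).foldl (fun d p => d.insert p.2 p.1) d).get? x = d.get? x := by
  intro cs
  induction cs with
  | nil => intro k d _; simp [PySem.List.enumerate_nil]
  | cons cch cs ih =>
    intro k d hx
    have hxc : x ≠ cch := fun h => hx (h ▸ List.mem_cons_self ..)
    have hxcs : x ∉ cs := fun h => hx (List.mem_cons_of_mem _ h)
    rw [PySem.List.enumerate_cons]
    simp only [List.foldl_cons]
    rw [ih (k+1) _ hxcs]
    exact PySem.Dict.get?_insert_of_ne _ _ hxc

theorem buildLast_mem (x : Char) : ∀ (cs : List Char) (k : Int) (d : PySem.Dict Char Int),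
    x ∈ cs →
    ∃ j : Nat, j < cs.length ∧ cs[j]? = some x ∧ x ∉ cs.drop (j+1) ∧
      ((PySem.List.enumerate cs k).foldl (fun d p => d.insert p.2 p.1) d).get? x
        = some (k + j) := by
  intro cs
  induction cs with
  | nil => intro k d hx; cases hx
  | cons cch cs ih =>
    intro k d hx
    rw [PySem.List.enumerate_cons]
    simp only [List.foldl_cons]
    by_cases hmem : x ∈ cs
    · obtain ⟨j, hj, hget, hnd, hfold⟩ := ih (k+1) (d.insert cch k) hmem
      refine ⟨j+1, by simpa using hj, by simpa using hget, by simpa using hnd, ?_⟩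
      rw [hfold]
      congr 1
      push_cast
      ring
    · have hxc : x = cch := by
        rcases List.mem_cons.mp hx with h | h
        · exact h
        · exact absurd h hmem
      subst hxc
      refine ⟨0, by simp, by simp, by simpa using hmem, ?_⟩
      rw [buildLast_not_mem x cs (k+1) _ hmem]
      simp [PySem.Dict.get?_insert_self]

def buildLast (cs : List Char) : PySem.Dict Char Int :=
  (PySem.List.enumerate cs 0).foldl (fun d p => d.insert p.2 p.1) PySem.Dict.empty

-- "last[x] > i" means exactly "x occurs after position i"
theorem last_getD_iff (cs : List Char) (x : Char) (hx : x ∈ cs) (i : Nat) :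
    ((i:Int) < (buildLast cs).getD x 0) ↔ x ∈ cs.drop (i+1) := by
  obtain ⟨j, hj, hget, hnd, hfold⟩ := buildLast_mem x cs 0 PySem.Dict.empty hx
  have hD : (buildLast cs).getD x 0 = (j:Int) := by
    unfold buildLast
    rw [PySem.Dict.getD_eq_get?_getD, hfold]
    simp
  rw [hD]
  constructor
  · intro hij
    exact mem_drop_of_getElem? cs (i+1) j (by exact_mod_cast hij) hget
  · intro hmem
    obtain ⟨m, hm, hx'⟩ := exists_getElem?_of_mem_drop cs (i+1) hmem
    by_contra hle
    have hji : j ≤ i := by omega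
    exact absurd (mem_drop_of_getElem? cs (j+1) m (by omega) hx') hnd

-- ---- A's loops compute G ----

theorem popW_subset (e : Char) (r : List Char) : ∀ st, popW e r st ⊆ st := by
  intro st
  induction st with
  | nil => simp [popW]
  | cons x st ih =>
    simp only [popW]
    split
    · exact fun a ha => List.mem_cons_of_mem _ (ih ha)
    · exact fun a ha => ha

theorem popW_mem_of_not_mem (e d : Char) (r : List Char) : ∀ st, d ∈ st → d ∉ r →
    d ∈ popW e r st := by
  intro st
  induction st with
  | nil => intro h _; cases h
  | cons x st ih =>
    intro hd hdr
    simp only [popW]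
    split
    · rename_i hcond
      rcases List.mem_cons.mp hd with rfl | h
      · exact absurd hcond.2 hdr
      · exact ih h hdr
    · exact hd

theorem popLoop_eq (cs : List Char) (k : Nat) (e : Char) : ∀ (st : List Char)
    (present : PySem.Set Char), (∀ x ∈ st, x ∈ cs) → (∀ x, x ∈ present ↔ x ∈ st) → st.Nodup →
    (popLoop (buildLast cs) (k:Int) e st present).1 = (popW e (cs.drop (k+1)) st.reverse).reverse
    ∧ (∀ x, x ∈ (popLoop (buildLast cs) (k:Int) e st present).2
          ↔ x ∈ (popLoop (buildLast cs) (k:Int) e st present).1)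
    ∧ (popLoop (buildLast cs) (k:Int) e st present).1 <+: st := by
  intro st
  induction st using List.reverseRecOn with
  | nil =>
    intro present _ hpres _
    rw [popLoop]
    exact ⟨by simp [popW], by simpa using hpres, List.nil_prefix⟩
  | append_singleton ys t ih =>
    intro present hsub hpres hnd
    have hne : ys ++ [t] ≠ [] := by simp
    have htcs : t ∈ cs := hsub t (by simp)
    have htys : t ∉ ys := by
      rcases List.nodup_append.mp hnd with ⟨_, _, hdisj⟩
      intro h
      exact hdisj t h t (by simp) rfl
    have hiff : ((k:Int) < (buildLast cs).getD t 0) ↔ t ∈ cs.drop (k+1) :=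
      last_getD_iff cs t htcs k
    rw [popLoop]
    rw [dif_neg hne]
    simp only [List.getLast_append_singleton, List.dropLast_concat]
    have hrev : (ys ++ [t]).reverse = t :: ys.reverse := by simp
    by_cases hcond : e < t ∧ t ∈ cs.drop (k+1)
    · rw [if_pos ⟨hcond.1, hiff.mpr hcond.2⟩]
      have hpres' : ∀ x, x ∈ PySem.Set.discard present t ↔ x ∈ ys := by
        intro x
        rw [PySem.Set.mem_discard]
        constructor
        · rintro ⟨hp, hne'⟩
          rcases List.mem_append.mp ((hpres x).mp hp) with h | h
          · exact h
          · simp at h; exact absurd h hne'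
        · intro h
          exact ⟨(hpres x).mpr (List.mem_append_left _ h), fun hx => htys (hx ▸ h)⟩
      obtain ⟨h1, h2, h3⟩ := ih (PySem.Set.discard present t)
        (fun x hx => hsub x (List.mem_append_left _ hx)) hpres'
        ((List.nodup_append.mp hnd).1)
      refine ⟨?_, h2, h3.trans (List.prefix_append _ _)⟩
      rw [h1, hrev]
      simp only [popW]
      rw [if_pos hcond]
    · rw [if_neg (fun hh => hcond ⟨hh.1, hiff.mp hh.2⟩)]
      refine ⟨?_, hpres, List.prefix_refl _⟩
      rw [hrev]
      simp only [popW]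
      rw [if_neg hcond]
      simp

theorem solveLoop_eq (cs : List Char) : ∀ (v : List Char) (k : Nat) (st : List Char)
    (present : PySem.Set Char), v = cs.drop k →
    (∀ x ∈ st, x ∈ cs) → (∀ x, x ∈ present ↔ x ∈ st) → st.Nodup →
    (solveLoop (buildLast cs) (PySem.List.enumerate v (k:Int)) st present).1 = G st.reverse v := by
  intro v
  induction v with
  | nil =>
    intro k st present _ _ _ _
    simp [PySem.List.enumerate_nil, solveLoop, G]
  | cons e v' ih =>
    intro k st present hv hsub hpres hnd
    have hv' : cs.drop (k+1) = v' := by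
      have : (cs.drop k).drop 1 = cs.drop (k+1) := by
        rw [List.drop_drop]
      rw [← this, ← hv]
      simp
    have hecs : e ∈ cs := by
      have : e ∈ cs.drop k := by rw [← hv]; exact List.mem_cons_self ..
      exact List.drop_subset _ _ this
    have hcast : (k:Int) + 1 = ((k+1 : Nat) : Int) := by push_cast; ring
    rw [PySem.List.enumerate_cons]
    simp only [solveLoop]
    by_cases hes : e ∈ st
    · rw [if_pos ((PySem.Set.contains_iff present e).mpr ((hpres e).mpr hes))]
      simp only [G]
      rw [if_pos (List.mem_reverse.mpr hes), hcast]
      exact ih (k+1) st present hv'.symm hsub hpres hnd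
    · rw [if_neg (fun h => hes ((hpres e).mp ((PySem.Set.contains_iff present e).mp h)))]
      obtain ⟨h1, h2, h3⟩ := popLoop_eq cs k e st present hsub hpres hnd
      set p := popLoop (buildLast cs) (k:Int) e st present with hp
      simp only [G]
      rw [if_neg (fun h => hes (List.mem_reverse.mp h)), hcast]
      have hrev : (p.1 ++ [e]).reverse = e :: popW e v' st.reverse := by
        rw [hv'] at h1
        simp [h1]
      rw [← hrev]
      apply ih (k+1) (p.1 ++ [e]) (PySem.Set.add p.2 e) hv'.symm
      · intro x hx
        rcases List.mem_append.mp hx with h | h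
        · exact hsub x (h3.subset h)
        · simp at h; exact h ▸ hecs
      · intro x
        rw [PySem.Set.mem_add]
        simp only [List.mem_append, List.mem_singleton]
        constructor
        · rintro (h | rfl)
          · exact Or.inl ((h2 x).mp h)
          · exact Or.inr rfl
        · rintro (h | rfl)
          · exact Or.inl ((h2 x).mpr h)
          · exact Or.inr rfl
      · have hnd1 : p.1.Nodup := hnd.sublist h3.sublist
        have hnotin : e ∉ p.1 := fun h => hes (h3.subset h)
        rw [List.nodup_append]
        refine ⟨hnd1, List.nodup_singleton e, ?_⟩
        intro a ha b hb
        simp only [List.mem_singleton] at hb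
        subst hb
        exact fun h => hnotin (h ▸ ha)

theorem solve_eq_G (s : String) : solve s = String.ofList (G [] s.toList) := by
  show String.ofList (solveLoop _ _ _ _).1 = _
  congr 1
  have h := solveLoop_eq s.toList s.toList 0 [] [] (by simp) (by simp) (by simp) List.nodup_nil
  simp only [Nat.cast_zero] at h
  simpa [buildLast] using h

-- ---- B's loop: characterisation of the selected position ----

theorem altLoop_spec (cs : List Char) : ∀ (v : List Char) (k pos : Nat)
    (cnt : PySem.Dict Char Int), v = cs.drop k → v ≠ [] →
    (∀ x, cnt.getD x 0 = ((cs.drop k).count x : Int)) →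
    pos < cs.length → pos < max k 1 →
    (∀ i < max k 1, cs.getD pos ' ' ≤ cs.getD i ' ') →
    (∀ i < pos, cs.getD pos ' ' < cs.getD i ' ') →
    (∀ i < k, cs.getD i ' ' ∈ cs.drop (i+1)) →
    ∃ pos' i0 : Nat,
      altLoop cs (PySem.List.enumerate v (k:Int)) (pos:Int) cnt = (pos':Int) ∧
      k ≤ i0 ∧ i0 < cs.length ∧ pos' ≤ i0 ∧ pos' < cs.length ∧
      cs.getD i0 ' ' ∉ cs.drop (i0+1) ∧
      (∀ i < i0, cs.getD i ' ' ∈ cs.drop (i+1)) ∧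
      (∀ i ≤ i0, cs.getD pos' ' ' ≤ cs.getD i ' ') ∧
      (∀ i < pos', cs.getD pos' ' ' < cs.getD i ' ') := by
  intro v
  induction v with
  | nil => intro k pos cnt hv hne; exact absurd rfl hne
  | cons ch v' ih =>
    intro k pos cnt hv hne hcnt hposlen hposmax hmin hstrict hA2
    clear hne
    have hklen : k < cs.length := by
      by_contra h
      have hd : cs.drop k = [] := List.drop_eq_nil_of_le (by omega)
      rw [hd] at hv
      cases hv
    have hdropk : cs.drop k = ch :: v' := hv.symm
    have hch : cs.getD k ' ' = ch := by
      have h0 : (cs.drop k)[0]'(by rw [hdropk]; simp) = ch := by simp [hdropk]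
      rw [List.getElem_drop] at h0
      rw [List.getD_eq_getElem _ _ hklen]
      simpa using h0
    have hv' : cs.drop (k+1) = v' := by
      have h1 : (cs.drop k).drop 1 = cs.drop (k+1) := by rw [List.drop_drop]
      rw [← h1, hdropk]
      simp
    have hposk : pos ≤ k := by
      rcases Nat.le_total k 1 with h | h
      · have hm : max k 1 = 1 := Nat.max_eq_right h
        omega
      · have hm : max k 1 = k := Nat.max_eq_left h
        omega
    set posN : Nat := if ch < cs.getD pos ' ' then k else pos with hposN
    have hcast2 : (if ch < PySem.List.pyGetD cs ((pos:Nat):Int) ' ' then (k:Int) else ((pos:Nat):Int)) = (posN:Int) := by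
      rw [PySem.List.pyGetD_natCast]
      rw [hposN]
      split <;> rfl
    have hposNlen : posN < cs.length := by
      rw [hposN]; split
      · exact hklen
      · exact hposlen
    have hposNk : posN ≤ k := by rw [hposN]; split <;> omega
    have hposNmax : posN < max (k+1) 1 := by
      have := Nat.le_max_left (k+1) 1
      omega
    have hminN : ∀ i < max (k+1) 1, cs.getD posN ' ' ≤ cs.getD i ' ' := by
      intro i hi
      have hmaxk1 : max (k+1) 1 = k + 1 := Nat.max_eq_left (by omega)
      have hik : i ≤ k := by omega
      rw [hposN]
      by_cases hlt : ch < cs.getD pos ' '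
      · rw [if_pos hlt]
        rcases Nat.lt_or_ge i k with hik2 | hik2
        · have h1 : i < max k 1 := by
            have := Nat.le_max_left k 1
            omega
          refine le_of_lt (lt_of_lt_of_le ?_ (hmin i h1))
          rw [hch]
          exact hlt
        · have hik3 : i = k := by omega
          rw [hik3]
      · rw [if_neg hlt]
        rcases Nat.lt_or_ge i (max k 1) with h1 | h1
        · exact hmin i h1
        · have hik3 : i = k := by
            have := Nat.le_max_left k 1
            omega
          rw [hik3, hch]
          exact not_lt.mp hlt
    have hstrictN : ∀ i < posN, cs.getD posN ' ' < cs.getD i ' ' := by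
      rw [hposN]
      by_cases hlt : ch < cs.getD pos ' '
      · rw [if_pos hlt]
        intro i hik
        have h1 : i < max k 1 := by
          have := Nat.le_max_left k 1
          omega
        refine lt_of_lt_of_le ?_ (hmin i h1)
        rw [hch]
        exact hlt
      · rw [if_neg hlt]
        exact hstrict
    have hA2' : ∀ x, (cnt.modify ch 0 (· - 1)).getD x 0 = ((cs.drop (k+1)).count x : Int) := by
      intro x
      rw [PySem.Dict.getD_modify, hv']
      by_cases hx : x = ch
      · subst hx
        rw [if_pos rfl, hcnt x, hdropk]
        have hc1 : List.count x (x :: v') = List.count x v' + 1 := by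
          simp
        rw [hc1]
        push_cast
        ring
      · rw [if_neg hx, hcnt x, hdropk]
        have hc1 : List.count x (ch :: v') = List.count x v' := by
          simp [List.count_cons]
          exact fun h => hx h.symm
        rw [hc1]
    rw [PySem.List.enumerate_cons]
    simp only [altLoop]
    rw [hcast2]
    by_cases hbreak : (cs.drop (k+1)).count ch = 0
    · have hbeq : ((cnt.modify ch 0 (· - 1)).getD ch 0 == 0) = true := by
        rw [hA2' ch, hbreak]
        rfl
      rw [if_pos hbeq]
      refine ⟨posN, k, rfl, le_refl k, hklen, hposNk, hposNlen, ?_, hA2, ?_, hstrictN⟩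
      · rw [hch]
        exact List.count_eq_zero.mp hbreak
      · intro i hik
        apply hminN i
        have := Nat.le_max_left (k+1) 1
        omega
    · have hbeq : ¬ (((cnt.modify ch 0 (· - 1)).getD ch 0 == 0) = true) := by
        rw [hA2' ch]
        simp only [beq_iff_eq]
        exact_mod_cast hbreak
      rw [if_neg hbeq]
      have hchmem : ch ∈ cs.drop (k+1) := by
        by_contra h
        exact hbreak (List.count_eq_zero.mpr h)
      have hvne : v' ≠ [] := by
        rw [hv'] at hchmem
        intro h
        rw [h] at hchmem
        cases hchmem
      have hcastk : (k:Int) + 1 = ((k+1:Nat):Int) := by push_cast; ring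
      rw [hcastk]
      obtain ⟨pos', i0, heq, hk1, h2, h3, h4, h5, h6, h7, h8⟩ :=
        ih (k+1) posN (cnt.modify ch 0 (· - 1)) hv'.symm hvne hA2' hposNlen hposNmax hminN hstrictN
          (fun i hi => by
            rcases Nat.lt_or_ge i k with h | h
            · exact hA2 i h
            · have hik : i = k := by omega
              rw [hik, hch]
              exact hchmem)
      exact ⟨pos', i0, heq, by omega, h2, h3, h4, h5, h6, h7, h8⟩

-- ---- the crux: the greedy stack satisfies the selection recursion ----

def GoodP (c : Char) (st w : List Char) : Prop :=
  ∀ w1 e r, w = w1 ++ e :: r → e < c → c ∈ r → ∃ d, d ∉ e :: r ∧ (d ∈ st ∨ d ∈ w1)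

theorem popW_split (c e : Char) (r : List Char) : ∀ st, c ∉ st →
    ((e < c ∧ c ∈ r) → ∃ d ∈ st, d ∉ e :: r) →
    popW e r (st ++ [c]) = popW e (r.filter (fun x => x ≠ c)) st ++ [c] := by
  intro st
  induction st with
  | nil =>
    intro _ hblock
    simp only [List.nil_append, popW]
    rw [if_neg]
    intro hcond
    obtain ⟨d, hd, _⟩ := hblock hcond
    cases hd
  | cons x st ih =>
    intro hc hblock
    have hxc : x ≠ c := fun h => hc (h ▸ List.mem_cons_self ..)
    have hmemiff : (x ∈ r) ↔ x ∈ r.filter (fun y => y ≠ c) := by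
      simp [List.mem_filter, hxc]
    simp only [List.cons_append, popW]
    by_cases hcond : e < x ∧ x ∈ r
    · rw [if_pos hcond, if_pos ⟨hcond.1, hmemiff.mp hcond.2⟩]
      apply ih (fun h => hc (List.mem_cons_of_mem _ h))
      intro h
      obtain ⟨d, hd, hdr⟩ := hblock h
      rcases List.mem_cons.mp hd with rfl | hst
      · exact absurd (List.mem_cons_of_mem _ hcond.2) hdr
      · exact ⟨d, hst, hdr⟩
    · rw [if_neg hcond, if_neg (fun hh => hcond ⟨hh.1, hmemiff.mpr hh.2⟩)]
      rfl

theorem GoodP_step (c e₀ : Char) (st st' w : List Char) (h : GoodP c st (e₀ :: w))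
    (hkeep : ∀ d, d ∈ st → d ∉ w → d ∈ st')
    (he₀ : e₀ ≠ c → e₀ ∈ st') :
    GoodP c st' w := by
  intro w1 e r hw he hcr
  obtain ⟨d, hd, hmem⟩ := h (e₀ :: w1) e r (by rw [hw]; simp) he hcr
  rcases hmem with hdst | hdw
  · by_cases hdw2 : d ∈ w
    · refine ⟨d, hd, Or.inr ?_⟩
      rw [hw] at hdw2
      rcases List.mem_append.mp hdw2 with h1 | h1
      · exact h1
      · exact absurd h1 hd
    · exact ⟨d, hd, Or.inl (hkeep d hdst hdw2)⟩
  · rcases List.mem_cons.mp hdw with rfl | h1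
    · exact ⟨d, hd, Or.inl (he₀ (fun hec => absurd (List.mem_cons_of_mem e hcr) (hec ▸ hd)))⟩
    · exact ⟨d, hd, Or.inr h1⟩

theorem Bstar (c : Char) : ∀ (w st : List Char), c ∉ st → GoodP c st w →
    G (st ++ [c]) w = c :: G st (w.filter (fun x => x ≠ c)) := by
  intro w
  induction w with
  | nil =>
    intro st _ _
    simp [G, List.reverse_append]
  | cons e r ih =>
    intro st hc hg
    by_cases hec : e = c
    · subst hec
      have hmem : e ∈ st ++ [e] := by simp
      simp only [G]
      rw [if_pos hmem, List.filter_cons_of_neg (by simp)]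
      exact ih st hc (GoodP_step e e st st r hg (fun d hd _ => hd) (fun h => absurd rfl h))
    · by_cases hes : e ∈ st
      · have hmem : e ∈ st ++ [c] := List.mem_append_left _ hes
        simp only [G]
        rw [if_pos hmem, List.filter_cons_of_pos (by simp [hec])]
        simp only [G]
        rw [if_pos hes]
        exact ih st hc (GoodP_step c e st st r hg (fun d hd _ => hd) (fun _ => hes))
      · have hmem : e ∉ st ++ [c] := by simp [hes, hec]
        simp only [G]
        rw [if_neg hmem, List.filter_cons_of_pos (by simp [hec])]
        simp only [G]
        rw [if_neg hes]
        have hblock : (e < c ∧ c ∈ r) → ∃ d ∈ st, d ∉ e :: r := by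
          intro hcond
          obtain ⟨d, hd, hmem'⟩ := hg [] e r rfl hcond.1 hcond.2
          rcases hmem' with h1 | h1
          · exact ⟨d, h1, hd⟩
          · cases h1
        rw [popW_split c e r st hc hblock]
        have hstep : G ((e :: popW e (r.filter (fun x => x ≠ c)) st) ++ [c]) r
            = c :: G (e :: popW e (r.filter (fun x => x ≠ c)) st) (r.filter (fun x => x ≠ c)) := by
          apply ih
          · simp only [List.mem_cons]
            rintro (rfl | h1)
            · exact hec rfl
            · exact hc (popW_subset _ _ _ h1)
          · apply GoodP_step c e st _ r hg
            · intro d hd hdr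
              refine List.mem_cons_of_mem _ (popW_mem_of_not_mem _ _ _ _ hd ?_)
              intro hmem'
              exact hdr (List.mem_of_mem_filter hmem')
            · intro _
              exact List.mem_cons_self ..
        simpa using hstep

theorem popW_all (e : Char) (r : List Char) : ∀ st, (∀ x ∈ st, e < x ∧ x ∈ r) →
    popW e r st = [] := by
  intro st
  induction st with
  | nil => intro _; rfl
  | cons x st ih =>
    intro h
    simp only [popW]
    rw [if_pos (h x (List.mem_cons_self ..))]
    exact ih (fun y hy => h y (List.mem_cons_of_mem _ hy))

theorem Astar (c : Char) (v : List Char) : ∀ (u st : List Char),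
    (∀ x ∈ u, c < x ∧ x ∈ v) → (∀ x ∈ st, c < x ∧ x ∈ v) → c ∉ st →
    G st (u ++ c :: v) = G [c] v := by
  intro u
  induction u with
  | nil =>
    intro st _ hst hc
    simp only [List.nil_append, G]
    rw [if_neg hc, popW_all c v st hst]
  | cons e u ih =>
    intro st hu hst hc
    have he := hu e (List.mem_cons_self ..)
    have hu' : ∀ x ∈ u, c < x ∧ x ∈ v := fun x hx => hu x (List.mem_cons_of_mem _ hx)
    simp only [List.cons_append, G]
    by_cases hes : e ∈ st
    · rw [if_pos hes]
      exact ih st hu' hst hc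
    · rw [if_neg hes]
      apply ih
      · exact hu'
      · intro x hx
        rcases List.mem_cons.mp hx with rfl | h1
        · exact he
        · exact hst x (popW_subset _ _ _ h1)
      · simp only [List.mem_cons]
        rintro (rfl | h1)
        · exact absurd he.1 (lt_irrefl c)
        · exact hc (popW_subset _ _ _ h1)

-- ---- main list-level equivalence ----

theorem G_eq_alt : ∀ (n : Nat) (cs : List Char), cs.length ≤ n → G [] cs = solveAltList cs := by
  intro n
  induction n with
  | zero =>
    intro cs h
    have hnil : cs = [] := List.eq_nil_of_length_eq_zero (by omega)
    subst hnil
    rw [solveAltList]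
    rfl
  | succ n ih =>
    intro cs hlen
    by_cases hnil : cs = []
    · subst hnil
      rw [solveAltList]
      rfl
    · have hunfold : solveAltList cs
          = (PySem.List.pyGetD cs (altLoop cs (PySem.List.enumerate cs 0) 0
                (cs.foldl (fun d ch => d.modify ch 0 (· + 1)) PySem.Dict.empty)) ' ')
            :: solveAltList ((PySem.List.slice cs
                  (some ((altLoop cs (PySem.List.enumerate cs 0) 0
                    (cs.foldl (fun d ch => d.modify ch 0 (· + 1)) PySem.Dict.empty)) + 1)) none).filter
                 (fun ch => ch ≠ (PySem.List.pyGetD cs (altLoop cs (PySem.List.enumerate cs 0) 0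
                    (cs.foldl (fun d ch => d.modify ch 0 (· + 1)) PySem.Dict.empty)) ' '))) := by
        rw [solveAltList, dif_neg hnil]
      rw [hunfold]
      have h0 : 0 < cs.length := List.length_pos_of_ne_nil hnil
      have hcnt0 : ∀ x, (cs.foldl (fun d ch => d.modify ch 0 (· + 1)) PySem.Dict.empty).getD x 0
          = ((cs.drop 0).count x : Int) := by
        intro x
        rw [PySem.Dict.getD_foldl_modify_add_one]
        simp
      obtain ⟨pos, i0, heq, hki0, hi0len, hposi0, hposlen, hA1, hA2, hmin, hstrict⟩ :=
        altLoop_spec cs cs 0 0 _ (by simp) hnil hcnt0 h0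
          (by rw [Nat.zero_max]; omega)
          (by
            intro i hi
            rw [Nat.zero_max] at hi
            have hi0 : i = 0 := by omega
            rw [hi0])
          (by intro i hi; exact absurd hi (Nat.not_lt_zero i))
          (by intro i hi; exact absurd hi (Nat.not_lt_zero i))
      simp only [Nat.cast_zero] at heq
      rw [heq, PySem.List.pyGetD_natCast]
      have hslice : PySem.List.slice cs (some ((pos:Int) + 1)) none = cs.drop (pos+1) := by
        rw [PySem.List.slice_from _ (by omega : (0:Int) ≤ (pos:Int) + 1)]
        have ht : ((pos:Int) + 1).toNat = pos + 1 := by omega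
        rw [ht]
      rw [hslice]
      set c := cs.getD pos ' ' with hc
      set v := cs.drop (pos+1) with hv
      set u := cs.take pos with hu
      have hgetpos : cs[pos]'hposlen = c := (List.getD_eq_getElem _ _ hposlen).symm
      have hdecomp : cs = u ++ c :: v := by
        conv_lhs => rw [← List.take_append_drop pos cs]
        rw [List.drop_eq_getElem_cons hposlen, hgetpos]
      have hufacts : ∀ x ∈ u, c < x ∧ x ∈ v := by
        intro x hx
        obtain ⟨i, hi, hxi⟩ := List.getElem_of_mem hx
        have hxq : u[i]? = some x := by
          rw [List.getElem?_eq_some_iff]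
          exact ⟨hi, hxi⟩
        have hilen : i < pos := by
          rw [hu, List.length_take] at hi
          omega
        have hicslen : i < cs.length := by omega
        have hxq2 : cs[i]? = some x := by
          rw [hu] at hxq
          rwa [List.getElem?_take_of_lt hilen] at hxq
        obtain ⟨hicslen', hxeq⟩ := List.getElem?_eq_some_iff.mp hxq2
        have hstrict' : c < x := by
          have hs := hstrict i hilen
          rwa [List.getD_eq_getElem _ _ hicslen', hxeq] at hs
        refine ⟨hstrict', ?_⟩
        have hxcs : x ∈ cs := List.mem_of_getElem? hxq2
        obtain ⟨j, hj, hget, hnd, -⟩ := buildLast_mem x cs 0 PySem.Dict.empty hxcs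
        obtain ⟨hj', hjx⟩ := List.getElem?_eq_some_iff.mp hget
        have hji0 : i0 ≤ j := by
          by_contra hji
          have hmem := hA2 j (by omega)
          rw [List.getD_eq_getElem _ _ hj, hjx] at hmem
          exact hnd hmem
        have hjpos : pos < j := by
          rcases Nat.lt_or_ge pos j with h | h
          · exact h
          · exfalso
            have hjp : j = pos := by omega
            have hgd : cs.getD j ' ' = x := by
              rw [List.getD_eq_getElem _ _ hj]
              exact hjx
            rw [hjp] at hgd
            have hxc : c = x := by
              rw [hc]
              exact hgd
            rw [hxc] at hstrict'
            exact lt_irrefl x hstrict'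
        exact mem_drop_of_getElem? cs (pos+1) j (by omega) hget
      have hGood : GoodP c [] v := by
        intro w1 e r hw he hcr
        by_cases hpi : pos = i0
        · exfalso
          have hcnot : c ∉ v := by
            rw [hc, hv, hpi]
            exact hA1
          exact hcnot (by rw [hw]; exact List.mem_append_right _ (List.mem_cons_of_mem _ hcr))
        · have hpilt : pos < i0 := lt_of_le_of_ne hposi0 hpi
          have hem : v[w1.length]? = some e := by
            rw [hw, List.getElem?_append_right (le_refl w1.length)]
            simp
          have habs : cs[pos + 1 + w1.length]? = some e := by
            rw [hv, List.getElem?_drop] at hem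
            exact hem
          have helen : pos + 1 + w1.length < cs.length := (List.getElem?_eq_some_iff.mp habs).1
          have hmgt : i0 < pos + 1 + w1.length := by
            by_contra hle
            have hminle := hmin (pos + 1 + w1.length) (by omega)
            rw [List.getD_eq_getElem _ _ helen, (List.getElem?_eq_some_iff.mp habs).2] at hminle
            exact absurd hminle (not_le.mpr he)
          refine ⟨cs.getD i0 ' ', ?_, Or.inr ?_⟩
          · intro hdin
            have h1 : cs.getD i0 ' ' ∈ v.drop w1.length := by
              have hdl : v.drop w1.length = e :: r := by rw [hw, List.drop_left]
              rw [hdl]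
              exact hdin
            rw [hv, List.drop_drop] at h1
            exact absurd (drop_subset_drop cs (i0+1) (pos + 1 + w1.length) (by omega) h1) hA1
          · have hidx : v[i0 - (pos+1)]? = some (cs.getD i0 ' ') := by
              rw [hv, List.getElem?_drop]
              have hii : pos + 1 + (i0 - (pos+1)) = i0 := by omega
              rw [hii, List.getElem?_eq_some_iff]
              exact ⟨hi0len, (List.getD_eq_getElem _ _ hi0len).symm⟩
            have hltw : i0 - (pos+1) < w1.length := by omega
            have hw1 : w1[i0 - (pos+1)]? = some (cs.getD i0 ' ') := by
              rw [hw, List.getElem?_append_left hltw] at hidx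
              exact hidx
            exact List.mem_of_getElem? hw1
      have hBstar := Bstar c v [] (by simp) hGood
      simp only [List.nil_append] at hBstar
      have hAstar : G [] cs = G [c] v := by
        conv_lhs => rw [hdecomp]
        exact Astar c v u [] hufacts (by simp) (by simp)
      rw [hAstar, hBstar]
      congr 1
      apply ih
      have hvlen : v.length < cs.length := by
        rw [hv, List.length_drop]
        omega
      calc (v.filter (fun x => x ≠ c)).length ≤ v.length := List.length_filter_le _ _
        _ ≤ n := by omega

-- ===== VERDICT (by name: the statement is the Claim_ definition above) =====
theorem solve_spec : Claim_equal_solve := by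
  intro s _
  show solve s = solve_alt s
  rw [solve_eq_G, solve_alt, G_eq_alt s.toList.length s.toList le_rfl]
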